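-- pv_equiv track=rewrite | github.com/aeebbr/Algorithm | 2025/02/prog_42584_주식가격.py | solution
-- ===== SOURCE A (Python) =====
-- def solution(prices):
--     # 초기화: 각 원소의 인덱스 번호를 거꾸로
--     # [..., 5, 4, 3, 2, 1, 0]
--     answer = [x for x in range(len(prices)-1, -1, -1)]
--     stack = []
--
--     for i in range(len(prices)-1, -1, -1):
--         cur = prices[i]
--
--         while stack:
--             top, top_i = stack.pop()
--
--             # 가격 하락
--             if cur > top:
--                 stack.append((top, top_i))
--
--                 # 가격이 떨어지지 않은 기간: 가격이 떨어진 위치 - 현재 위치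
--                 answer[i] = top_i - i
--                 break
--
--         stack.append((cur, i))
--
--     return answer
-- ===== SOURCE B (Python) =====
-- def solution(prices):
--     n = len(prices)
--     answer = []
--     for i in range(n):
--         sec = n - 1 - i
--         for j in range(i + 1, n):
--             if prices[j] < prices[i]:
--                 sec = j - i
--                 break
--         answer.append(sec)
--     return answer
-- ===== Notes on version B (the rewrite author's own statement) =====
-- stated objective: simpler
-- what changed: Replaced the right-to-left monotonic-stack scan with a direct per-index forward scan that finds the first strictly smaller later price (no stack, no mutation of a prefilled answer list).
import Mathlib
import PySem

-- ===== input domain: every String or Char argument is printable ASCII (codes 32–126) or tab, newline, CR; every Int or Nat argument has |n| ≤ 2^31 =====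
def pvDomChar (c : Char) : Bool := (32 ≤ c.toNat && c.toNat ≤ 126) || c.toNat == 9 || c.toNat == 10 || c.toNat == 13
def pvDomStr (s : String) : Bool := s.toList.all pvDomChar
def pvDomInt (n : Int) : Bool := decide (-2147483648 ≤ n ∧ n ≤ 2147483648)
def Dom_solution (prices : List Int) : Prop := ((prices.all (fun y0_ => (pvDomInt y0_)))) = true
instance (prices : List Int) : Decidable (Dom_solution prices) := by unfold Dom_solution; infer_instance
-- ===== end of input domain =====

-- B replaces A's right-to-left monotonic stack by a plain per-index forward scan (simpler, no stack).

-- ===== PORT A =====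
-- the inner `while stack:` loop: pop until empty, or until cur > top (then push top back and write answer[i])
def popLoop (cur i : Int) (stack : List (Int × Int)) (answer : List Int) :
    List (Int × Int) × List Int :=
  match stack with
  | [] => ([], answer)
  | (top, top_i) :: rest =>
    if cur > top then ((top, top_i) :: rest, answer.set i.toNat (top_i - i))
    else popLoop cur i rest answer

def solution (prices : List Int) : List Int :=
  (((PySem.List.pyRange ((prices.length : Int) - 1) (-1) (-1)).foldl
    (fun (st : List Int × List (Int × Int)) (i : Int) =>
      let cur := (PySem.List.pyGet? prices i).getD 0
      let (stack', answer') := popLoop cur i st.2 st.1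
      (answer', (cur, i) :: stack'))
    (PySem.List.pyRange ((prices.length : Int) - 1) (-1) (-1), []))).1

-- ===== PORT B =====
-- the inner `for j in range(i+1, n): if prices[j] < prices[i]: … break` loop, as a find?
def findDrop (prices : List Int) (i : Nat) : Option Nat :=
  (List.range' (i + 1) (prices.length - (i + 1))).find?
    (fun j => prices.getD j 0 < prices.getD i 0)

def solution_alt (prices : List Int) : List Int :=
  (List.range prices.length).map (fun i =>
    match findDrop prices i with
    | some j => (j : Int) - (i : Int)
    | none => (prices.length : Int) - 1 - (i : Int))

-- ===== PRECONDITION & SPEC =====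
def Spec_solution (prices : List Int) (out : List Int) : Prop := out = solution_alt prices
instance (prices : List Int) (out : List Int) : Decidable (Spec_solution prices out) := by unfold Spec_solution; infer_instance

-- ===== CLAIM (what is proved, stated in full; the proofs are below) =====
def Claim_equal_solution : Prop := ∀ (prices : List Int), Dom_solution prices → Spec_solution prices (solution prices)

-- ===== LEMMAS AND PROOFS =====

-- first index k ≥ s with prices[k] < c (none if there is none)
def firstBelow (prices : List Int) (c : Int) (s : Nat) : Option Nat :=
  if h : s < prices.length then
    if prices.getD s 0 < c then some s else firstBelow prices c (s + 1)
  else none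
termination_by prices.length - s

theorem firstBelow_of_le (prices : List Int) (c : Int) (s : Nat)
    (h : prices.length ≤ s) : firstBelow prices c s = none := by
  rw [firstBelow]; simp [Nat.not_lt.mpr h]

theorem firstBelow_bounds (prices : List Int) (c : Int) (s j : Nat)
    (h : firstBelow prices c s = some j) :
    s ≤ j ∧ j < prices.length ∧ prices.getD j 0 < c := by
  fun_induction firstBelow prices c s with
  | case1 s hs hlt => simp_all
  | case2 s hs hlt ih => have := ih h; omega
  | case3 s hs => simp_all

theorem firstBelow_min (prices : List Int) (c : Int) (s j : Nat)
    (h : firstBelow prices c s = some j) :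
    ∀ k, s ≤ k → k < j → ¬ prices.getD k 0 < c := by
  fun_induction firstBelow prices c s with
  | case1 s hs hlt =>
    intro k hk1 hk2
    cases h; omega
  | case2 s hs hlt ih =>
    intro k hk1 hk2 hkc
    rcases Nat.eq_or_lt_of_le hk1 with rfl | h1
    · exact hlt hkc
    · exact ih h k h1 hk2 hkc
  | case3 s hs => simp_all

theorem firstBelow_none (prices : List Int) (c : Int) (s : Nat)
    (h : firstBelow prices c s = none) :
    ∀ k, s ≤ k → k < prices.length → ¬ prices.getD k 0 < c := by
  fun_induction firstBelow prices c s with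
  | case1 s hs hlt => simp_all
  | case2 s hs hlt ih =>
    intro k hk1 hk2 hkc
    rcases Nat.eq_or_lt_of_le hk1 with rfl | h1
    · exact hlt hkc
    · exact ih h k h1 hk2 hkc
  | case3 s hs => intro k hk1 hk2; omega

theorem firstBelow_of_forall (prices : List Int) (c : Int) (s : Nat)
    (h : ∀ k, s ≤ k → k < prices.length → ¬ prices.getD k 0 < c) :
    firstBelow prices c s = none := by
  fun_induction firstBelow prices c s with
  | case1 s hs hlt => exact absurd hlt (h s le_rfl hs)
  | case2 s hs hlt ih => exact ih (fun k hk1 hk2 => h k (by omega) hk2)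
  | case3 s hs => rfl

theorem firstBelow_skip (prices : List Int) (c : Int) (s t : Nat) (hst : s ≤ t)
    (h : ∀ k, s ≤ k → k < t → ¬ prices.getD k 0 < c) :
    firstBelow prices c s = firstBelow prices c t := by
  induction t, hst using Nat.le_induction with
  | base => rfl
  | succ t hst ih =>
    rw [ih (fun k hk1 hk2 => h k hk1 (by omega))]
    by_cases hlt : t < prices.length
    · rw [firstBelow, dif_pos hlt, if_neg (h t hst (by omega))]
    · rw [firstBelow_of_le _ _ _ (by omega), firstBelow_of_le _ _ _ (by omega)]

-- stack contents of A after index i has been processed: the chain of successive "next strictly smaller" indices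
def chain (prices : List Int) (i : Nat) : List (Int × Int) :=
  (prices.getD i 0, (i : Int)) ::
    (match h : firstBelow prices (prices.getD i 0) (i + 1) with
     | some j => chain prices j
     | none => [])
termination_by prices.length - i
decreasing_by
  have := firstBelow_bounds prices (prices.getD i 0) (i + 1) j h
  omega

theorem chain_eq_some (prices : List Int) (t j : Nat)
    (h : firstBelow prices (prices.getD t 0) (t + 1) = some j) :
    chain prices t = (prices.getD t 0, (t : Int)) :: chain prices j := by
  rw [chain]; split <;> simp_all

theorem chain_eq_none (prices : List Int) (t : Nat)
    (h : firstBelow prices (prices.getD t 0) (t + 1) = none) :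
    chain prices t = [(prices.getD t 0, (t : Int))] := by
  rw [chain]; split <;> simp_all

theorem popLoop_chain (prices : List Int) (cur i : Int) :
    ∀ t, t < prices.length → ∀ answer,
      popLoop cur i (chain prices t) answer =
        match firstBelow prices cur t with
        | some j => (chain prices j, answer.set i.toNat ((j : Int) - i))
        | none => ([], answer) := by
  have main : ∀ d t, prices.length - t ≤ d → t < prices.length → ∀ answer,
      popLoop cur i (chain prices t) answer =
        match firstBelow prices cur t with
        | some j => (chain prices j, answer.set i.toNat ((j : Int) - i))
        | none => ([], answer) := by
    intro d
    induction d with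
    | zero => intro t h1 h2; omega
    | succ d ih =>
      intro t h1 ht answer
      by_cases hc : prices.getD t 0 < cur
      · have hfb : firstBelow prices cur t = some t := by
          rw [firstBelow, dif_pos ht, if_pos hc]
        rw [hfb]
        conv_lhs => rw [chain]
        simp only [popLoop]
        rw [if_pos hc]
        conv_rhs => rw [chain]
      · have hskip : firstBelow prices cur t = firstBelow prices cur (t + 1) := by
          rw [firstBelow, dif_pos ht, if_neg hc]
        rcases hfb2 : firstBelow prices (prices.getD t 0) (t + 1) with _ | j
        · have hnone : firstBelow prices cur (t + 1) = none :=
            firstBelow_of_forall _ _ _ (fun k hk1 hk2 hkc =>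
              (firstBelow_none _ _ _ hfb2 k hk1 hk2)
                (lt_of_lt_of_le hkc (not_lt.1 hc)))
          rw [hskip, hnone, chain_eq_none prices t hfb2]
          simp only [popLoop]
          rw [if_neg hc]
        · have hbj := firstBelow_bounds _ _ _ _ hfb2
          have hskip2 : firstBelow prices cur (t + 1) = firstBelow prices cur j :=
            firstBelow_skip _ _ _ _ (by omega) (fun k hk1 hk2 hkc =>
              (firstBelow_min _ _ _ _ hfb2 k hk1 hk2)
                (lt_of_lt_of_le hkc (not_lt.1 hc)))
          rw [chain_eq_some prices t j hfb2]
          simp only [popLoop]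
          rw [if_neg hc, hskip, hskip2]
          exact ih j (by omega) hbj.2.1 answer
  exact fun t ht => main prices.length t (by omega) ht

def specAt (prices : List Int) (i : Nat) : Int :=
  match firstBelow prices (prices.getD i 0) (i + 1) with
  | some j => (j : Int) - (i : Int)
  | none => (prices.length : Int) - 1 - (i : Int)

def ansExp (prices : List Int) (t : Nat) : List Int :=
  (List.range prices.length).map (fun k =>
    if t ≤ k then specAt prices k else (prices.length : Int) - 1 - (k : Int))

theorem ansExp_succ_none (prices : List Int) (t : Nat)
    (h : firstBelow prices (prices.getD t 0) (t + 1) = none) :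
    ansExp prices t = ansExp prices (t + 1) := by
  unfold ansExp
  refine List.map_congr_left fun k hk => ?_
  by_cases hkt : k = t
  · subst hkt; rw [if_pos le_rfl, if_neg (by omega)]; unfold specAt; rw [h]
  · by_cases h2 : t ≤ k
    · rw [if_pos h2, if_pos (by omega)]
    · rw [if_neg h2, if_neg (by omega)]

theorem ansExp_succ_some (prices : List Int) (t j : Nat) (_ht : t < prices.length)
    (h : firstBelow prices (prices.getD t 0) (t + 1) = some j) :
    (ansExp prices (t + 1)).set t ((j : Int) - (t : Int)) = ansExp prices t := by
  apply List.ext_getElem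
  · simp [ansExp]
  · intro k hk1 hk2
    simp only [ansExp, List.getElem_set, List.getElem_map, List.getElem_range]
    by_cases hkt : t = k
    · subst hkt
      rw [if_pos rfl, if_pos le_rfl]
      unfold specAt; rw [h]
    · rw [if_neg hkt]
      by_cases h2 : t ≤ k
      · rw [if_pos (by omega), if_pos h2]
      · rw [if_neg (by omega), if_neg h2]

theorem outer_loop (prices : List Int) :
    ∀ t, t ≤ prices.length →
      ((PySem.List.pyRange ((prices.length : Int) - 1) ((t : Int) - 1) (-1)).foldl
        (fun (st : List Int × List (Int × Int)) (i : Int) =>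
          let cur := (PySem.List.pyGet? prices i).getD 0
          let (stack', answer') := popLoop cur i st.2 st.1
          (answer', (cur, i) :: stack'))
        (ansExp prices prices.length, [])) =
      (ansExp prices t, if t < prices.length then chain prices t else []) := by
  have main : ∀ d t, prices.length - t ≤ d → t ≤ prices.length →
      ((PySem.List.pyRange ((prices.length : Int) - 1) ((t : Int) - 1) (-1)).foldl
        (fun (st : List Int × List (Int × Int)) (i : Int) =>
          let cur := (PySem.List.pyGet? prices i).getD 0
          let (stack', answer') := popLoop cur i st.2 st.1
          (answer', (cur, i) :: stack'))
        (ansExp prices prices.length, [])) =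
      (ansExp prices t, if t < prices.length then chain prices t else []) := by
    intro d
    induction d with
    | zero =>
      intro t h1 h2
      have : t = prices.length := by omega
      subst this
      rw [PySem.List.pyRange_neg_one_eq_nil (by omega)]
      simp
    | succ d ih =>
      intro t h1 ht
      by_cases htn : t = prices.length
      · subst htn
        rw [PySem.List.pyRange_neg_one_eq_nil (by omega)]
        simp
      · have htlt : t < prices.length := Nat.lt_of_le_of_ne ht htn
        have ih' := ih (t + 1) (by omega) (by omega)
        have hcast : (((t + 1 : Nat)) : Int) - 1 = (t : Int) := by push_cast; ring
        rw [hcast] at ih'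
        have hsplit : PySem.List.pyRange ((prices.length : Int) - 1) ((t : Int) - 1) (-1)
            = PySem.List.pyRange ((prices.length : Int) - 1) (t : Int) (-1) ++ [(t : Int)] := by
          rw [PySem.List.pyRange_neg_one_eq_reverse, PySem.List.pyRange_neg_one_eq_reverse,
            sub_add_cancel, sub_add_cancel,
            PySem.List.pyRange_one_cons (by exact_mod_cast htlt), List.reverse_cons]
        rw [hsplit, List.foldl_append, ih']
        simp only [List.foldl_cons, List.foldl_nil]
        have hcur : (PySem.List.pyGet? prices (t : Int)).getD 0 = prices.getD t 0 := by
          simp [PySem.List.pyGet?_natCast, List.getD]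
        by_cases htn1 : t + 1 < prices.length
        · rw [if_pos htn1]
          simp only [hcur]
          rw [popLoop_chain prices (prices.getD t 0) (t : Int) (t + 1) htn1]
          rcases hfb : firstBelow prices (prices.getD t 0) (t + 1) with _ | j
          · simp only
            rw [if_pos htlt, chain_eq_none prices t hfb, ansExp_succ_none prices t hfb]
          · simp only
            rw [if_pos htlt, chain_eq_some prices t j hfb]
            have : ((t : Int)).toNat = t := Int.toNat_natCast t
            rw [this, ansExp_succ_some prices t j htlt hfb]
        · rw [if_neg htn1]
          simp only [popLoop, hcur]
          have hfb : firstBelow prices (prices.getD t 0) (t + 1) =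
              none := firstBelow_of_le _ _ _ (by omega)
          rw [if_pos htlt, chain_eq_none prices t hfb, ansExp_succ_none prices t hfb]
  exact fun t ht => main prices.length t (by omega) ht

theorem init_eq (prices : List Int) :
    PySem.List.pyRange ((prices.length : Int) - 1) (-1) (-1) = ansExp prices prices.length := by
  rw [PySem.List.pyRange_neg_one]
  unfold ansExp
  have h : ((prices.length : Int) - 1 - (-1)).toNat = prices.length := by omega
  rw [h]
  refine List.map_congr_left fun k hk => ?_
  rw [if_neg (by exact Nat.not_le.2 (List.mem_range.1 hk))]

theorem find?_eq_firstBelow (prices : List Int) (c : Int) :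
    ∀ s, (List.range' s (prices.length - s)).find? (fun j => prices.getD j 0 < c)
        = firstBelow prices c s := by
  have main : ∀ d s, prices.length - s ≤ d →
      (List.range' s (prices.length - s)).find? (fun j => prices.getD j 0 < c)
        = firstBelow prices c s := by
    intro d
    induction d with
    | zero =>
      intro s h1
      have h2 : prices.length - s = 0 := by omega
      rw [h2, firstBelow_of_le _ _ _ (by omega)]
      rfl
    | succ d ih =>
      intro s h1
      by_cases hs : s < prices.length
      · have h2 : prices.length - s = (prices.length - (s + 1)) + 1 := by omega
        rw [h2, List.range'_succ, List.find?_cons]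
        by_cases hc : prices.getD s 0 < c
        · simp only [decide_eq_true hc]
          rw [firstBelow, dif_pos hs, if_pos hc]
        · simp only [decide_eq_false hc]
          rw [firstBelow, dif_pos hs, if_neg hc]
          exact ih (s + 1) (by omega)
      · have h2 : prices.length - s = 0 := by omega
        rw [h2, firstBelow_of_le _ _ _ (by omega)]
        rfl
  exact fun s => main prices.length s (by omega)

theorem solution_eq_map (prices : List Int) :
    solution prices = (List.range prices.length).map (specAt prices) := by
  unfold solution
  have h0 : ((0 : Nat) : Int) - 1 = (-1 : Int) := by norm_num
  have := outer_loop prices 0 (Nat.zero_le _)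
  rw [h0, ← init_eq] at this
  rw [this]
  unfold ansExp
  refine List.map_congr_left fun k hk => ?_
  rw [if_pos (Nat.zero_le k)]

-- ===== VERDICT (by name: the statement is the Claim_ definition above) =====
theorem solution_spec : Claim_equal_solution := by
  intro prices _
  unfold Spec_solution
  rw [solution_eq_map]
  unfold solution_alt specAt findDrop
  refine List.map_congr_left (fun i hi => ?_)
  rw [find?_eq_firstBelow]
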